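-- pv_equiv track=rewrite | github.com/alb4h/LT_TCSPY3 | chapter-7-exercises.py | func_75
-- ===== SOURCE A (Python) =====
-- def func_75(list):
--     first_even = 0
--     sum = 0
--     for i in list:
--         if i % 2 == 0:
--             if first_even == 0:
--                 first_even += 1
--             else:
--                 sum += i
--         else:
--             sum += i
--     return sum
-- ===== SOURCE B (Python) =====
-- def func_75(list):
--     total = sum(list)
--     for i in list:
--         if i % 2 == 0:
--             return total - i
--     return total
-- ===== Notes on version B (the rewrite author's own statement) =====
-- stated objective: simpler
-- what changed: Replaces the running-sum-with-flag pass by computing the full sum up front and subtracting the first even element found in a short early-returning scan.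
import Mathlib
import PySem

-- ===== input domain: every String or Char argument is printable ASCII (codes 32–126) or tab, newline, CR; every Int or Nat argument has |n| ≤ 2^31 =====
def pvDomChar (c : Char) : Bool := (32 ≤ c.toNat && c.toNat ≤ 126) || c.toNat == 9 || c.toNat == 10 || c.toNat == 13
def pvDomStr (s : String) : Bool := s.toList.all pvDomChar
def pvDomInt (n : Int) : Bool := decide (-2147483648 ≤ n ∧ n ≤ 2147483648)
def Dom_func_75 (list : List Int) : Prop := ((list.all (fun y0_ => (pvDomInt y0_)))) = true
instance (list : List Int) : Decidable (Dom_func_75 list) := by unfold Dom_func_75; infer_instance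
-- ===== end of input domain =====

-- B computes the total sum up front and subtracts the first even element in an
-- early-returning scan, instead of A's running sum with a first-even flag (objective: simpler).

-- ===== PORT A =====
def func_75 (list : List Int) : Int :=
  (list.foldl (fun st i =>
    if PySem.Int.mod i 2 = 0 then
      if st.1 = 0 then (st.1 + 1, st.2) else (st.1, st.2 + i)
    else (st.1, st.2 + i)) ((0 : Int), (0 : Int))).2

-- ===== PORT B =====
def func_75_altGo (total : Int) : List Int → Int
  | [] => total
  | i :: rest => if PySem.Int.mod i 2 = 0 then total - i else func_75_altGo total rest

def func_75_alt (list : List Int) : Int := func_75_altGo list.sum list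

-- ===== PRECONDITION & SPEC =====
def Spec_func_75 (list : List Int) (out : Int) : Prop := out = func_75_alt list
instance (list : List Int) (out : Int) : Decidable (Spec_func_75 list out) := by unfold Spec_func_75; infer_instance

-- ===== CLAIM (what is proved, stated in full; the proofs are below) =====
def Claim_equal_func_75 : Prop := ∀ (list : List Int), Dom_func_75 list → Spec_func_75 list (func_75 list)

-- ===== LEMMAS AND PROOFS =====
theorem go_shift (l : List Int) (t : Int) : func_75_altGo t l = t + func_75_altGo 0 l := by
  induction l with
  | nil => simp [func_75_altGo]
  | cons i rest ih =>
    simp only [func_75_altGo]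
    split_ifs with h
    · ring
    · rw [ih]

theorem foldl_flag_one (l : List Int) (s : Int) :
    (l.foldl (fun st i =>
      if PySem.Int.mod i 2 = 0 then
        if st.1 = 0 then (st.1 + 1, st.2) else (st.1, st.2 + i)
      else (st.1, st.2 + i)) ((1 : Int), s)).2 = s + l.sum := by
  induction l generalizing s with
  | nil => simp
  | cons i rest ih =>
    simp only [List.foldl_cons, List.sum_cons]
    split_ifs with h h2
    · exact absurd h2 one_ne_zero
    · rw [ih]; ring
    · rw [ih]; ring

theorem foldl_flag_zero (l : List Int) (s : Int) :
    (l.foldl (fun st i =>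
      if PySem.Int.mod i 2 = 0 then
        if st.1 = 0 then (st.1 + 1, st.2) else (st.1, st.2 + i)
      else (st.1, st.2 + i)) ((0 : Int), s)).2 = s + func_75_altGo l.sum l := by
  induction l generalizing s with
  | nil => simp [func_75_altGo]
  | cons i rest ih =>
    simp only [List.foldl_cons, List.sum_cons, func_75_altGo]
    split_ifs with h
    · simp only [show (0:Int) + 1 = 1 from rfl]
      rw [foldl_flag_one]; ring
    · rw [ih, go_shift rest rest.sum, go_shift rest (i + rest.sum)]; ring

-- ===== VERDICT (by name: the statement is the Claim_ definition above) =====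
theorem func_75_spec : Claim_equal_func_75 := by
  intro l _
  unfold Spec_func_75 func_75 func_75_alt
  rw [foldl_flag_zero]
  ring
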